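-- pv_equiv track=rewrite | github.com/gka0903/Coding_Test | 답안/3.py | find_trait
-- ===== SOURCE A (Python) =====
-- def find_trait(n, p):
--     # 1. 멈춤 조건: 1세대는 무조건 "Rr"
--     if n == 1:
--         return "Rr"
--
--     # 2. 부모의 위치 계산
--     parent_p = (p - 1) // 4 + 1
--     # 부모의 형질을 재귀적으로 찾아옴
--     parent_trait = find_trait(n - 1, parent_p)
--
--     # 3. 부모가 순종(RR, rr)이면 자식도 무조건 순종
--     if parent_trait != "Rr":
--         return parent_trait
--     # 4. 부모가 잡종(Rr)이면 자식의 순서에 따라 형질 결정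
--     else:
--         child_order = (p - 1) % 4
--         if child_order == 0:
--             return "RR"
--         elif child_order == 3:
--             return "rr"
--         else:
--             return "Rr"
-- ===== SOURCE B (Python) =====
-- def find_trait(n, p):
--     # Iterative: collect the n-1 base-4 child-order digits of p-1 (least significant
--     # first), then scan them from most significant (generation 2) downwards; the first
--     # digit 0 locks "RR", the first digit 3 locks "rr", otherwise the trait stays "Rr".
--     d = p - 1
--     digits = []
--     for _ in range(n - 1):
--         digits.append(d % 4)
--         d //= 4
--     for dig in reversed(digits):
--         if dig == 0:
--             return "RR"
--         if dig == 3: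
--             return "rr"
--     return "Rr"
-- ===== Notes on version B (the rewrite author's own statement) =====
-- stated objective: alternative
-- what changed: Replaced the top-down recursion with an iterative single forward pass: extract the n-1 base-4 digits of p-1 and scan them most-significant first, returning at the first locking digit (0 -> RR, 3 -> rr).
import Mathlib
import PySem

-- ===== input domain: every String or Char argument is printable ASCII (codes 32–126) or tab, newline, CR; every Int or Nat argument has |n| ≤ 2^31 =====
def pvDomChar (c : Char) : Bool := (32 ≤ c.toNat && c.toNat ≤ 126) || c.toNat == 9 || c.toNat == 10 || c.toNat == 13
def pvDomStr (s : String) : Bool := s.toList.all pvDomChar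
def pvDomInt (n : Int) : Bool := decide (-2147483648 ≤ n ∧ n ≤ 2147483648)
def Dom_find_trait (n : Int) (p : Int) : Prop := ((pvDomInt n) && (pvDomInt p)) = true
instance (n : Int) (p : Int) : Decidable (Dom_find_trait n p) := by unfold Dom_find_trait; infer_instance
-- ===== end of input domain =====

-- B replaces A's top-down recursion by one forward pass over the base-4 digits of p-1 (alternative decomposition, same cost).


-- ===== PORT A =====
def find_trait (n : Int) (p : Int) : String :=
  if n = 1 then "Rr"
  else if n < 1 then "Rr"   -- totalization guard only: Python A diverges here (excluded by Pre_)
  else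
    let parent_p := PySem.Int.floordiv (p - 1) 4 + 1
    let parent_trait := find_trait (n - 1) parent_p
    if parent_trait ≠ "Rr" then parent_trait
    else
      let child_order := PySem.Int.mod (p - 1) 4
      if child_order = 0 then "RR"
      else if child_order = 3 then "rr"
      else "Rr"
termination_by n.toNat
decreasing_by omega

-- ===== PORT B =====
-- the digit-collection loop of Source B: k iterations of (append d % 4; d //= 4); the cons
-- keeps the digits most-significant first, i.e. already in the order Source B's 'reversed(digits)' reads them
def pvDigitsLoop : Nat → Int → List Int → Int × List Int
  | 0, d, acc => (d, acc)
  | k + 1, d, acc => pvDigitsLoop k (PySem.Int.floordiv d 4) (PySem.Int.mod d 4 :: acc)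

-- the scan over reversed(digits) of Source B
def pvScan : List Int → String
  | [] => "Rr"
  | dig :: rest => if dig = 0 then "RR" else if dig = 3 then "rr" else pvScan rest

def find_trait_alt (n : Int) (p : Int) : String :=
  let digits := (pvDigitsLoop (n - 1).toNat (p - 1) []).2
  pvScan digits

-- ===== PRECONDITION & SPEC =====
-- Pre_ excludes n ≤ 0, where Python A infinitely recurses (RecursionError).
def Pre_find_trait (n : Int) (p : Int) : Prop := 1 ≤ n
instance (n : Int) (p : Int) : Decidable (Pre_find_trait n p) := by unfold Pre_find_trait; infer_instance
def pvWitness_find_trait : Int × Int := (3, 7)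
def Spec_find_trait (n : Int) (p : Int) (out : String) : Prop := out = find_trait_alt n p
instance (n : Int) (p : Int) (out : String) : Decidable (Spec_find_trait n p out) := by unfold Spec_find_trait; infer_instance

-- ===== CLAIM (what is proved, stated in full; the proofs are below) =====
def Claim_equal_find_trait : Prop := ∀ (n : Int) (p : Int), Dom_find_trait n p → Pre_find_trait n p → Spec_find_trait n p (find_trait n p)

-- ===== LEMMAS AND PROOFS =====
-- the accumulator-free digit list: least-significant (generation n) digit first
def pvDigits : Nat → Int → List Int
  | 0, _ => []
  | k + 1, d => PySem.Int.mod d 4 :: pvDigits k (PySem.Int.floordiv d 4)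

theorem pvDigitsLoop_eq (k : Nat) : ∀ (d : Int) (acc : List Int),
    (pvDigitsLoop k d acc).2 = (pvDigits k d).reverse ++ acc := by
  induction k with
  | zero => intro d acc; simp [pvDigitsLoop, pvDigits]
  | succ k ih => intro d acc; simp [pvDigitsLoop, pvDigits, ih]

theorem pvScan_append (M : List Int) (x : Int) :
    pvScan (M ++ [x]) =
      if pvScan M ≠ "Rr" then pvScan M
      else if x = 0 then "RR" else if x = 3 then "rr" else "Rr" := by
  induction M with
  | nil => simp [pvScan]
  | cons dig rest ih =>
    by_cases h0 : dig = 0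
    · simp [pvScan, h0]
    · by_cases h3 : dig = 3
      · simp [pvScan, h0, h3]
      · simp [pvScan, h0, h3, ih]

theorem find_trait_eq_scan (k : Nat) : ∀ (p : Int),
    find_trait ((k : Int) + 1) p = pvScan (pvDigits k (p - 1)).reverse := by
  induction k with
  | zero =>
    intro p
    rw [find_trait]
    simp [pvDigits, pvScan]
  | succ k ih =>
    intro p
    rw [find_trait]
    have h1 : ¬ (((k + 1 : Nat) : Int) + 1 = 1) := by omega
    have h2 : ¬ (((k + 1 : Nat) : Int) + 1 < 1) := by omega
    rw [if_neg h1, if_neg h2]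
    have hrec : (((k + 1 : Nat) : Int) + 1 - 1) = (k : Int) + 1 := by push_cast; ring
    have hp : PySem.Int.floordiv (p - 1) 4 + 1 - 1 = PySem.Int.floordiv (p - 1) 4 := by ring
    rw [hrec]; simp only [ih, hp]
    rw [show pvDigits (k + 1) (p - 1) = PySem.Int.mod (p - 1) 4 :: pvDigits k (PySem.Int.floordiv (p - 1) 4) from rfl]
    rw [List.reverse_cons, pvScan_append]

-- ===== VERDICT (by name: the statement is the Claim_ definition above) =====
theorem find_trait_spec : Claim_equal_find_trait := by
  intro n p _ hpre
  unfold Spec_find_trait find_trait_alt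
  have hk : n = ((n - 1).toNat : Int) + 1 := by
    unfold Pre_find_trait at hpre; omega
  rw [pvDigitsLoop_eq, List.append_nil, hk]
  have ht : (((n - 1).toNat : Int) + 1 - 1).toNat = (n - 1).toNat := by omega
  rw [ht, find_trait_eq_scan]
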